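-- pv_equiv track=rewrite | github.com/keon/algorithms | algorithms/string/breaking_bad.py | match_symbol_1
-- ===== SOURCE A (Python) =====
-- def match_symbol_1(words: list[str], symbols: list[str]) -> list[str]:
--     """Match the longest symbol in each word using sorted symbol list.
--
--     Args:
--         words: List of words to search through.
--         symbols: List of symbols to match, sorted by length descending.
--
--     Returns:
--         List of words with the longest matched symbol bracketed.
--
--     Examples:
--         >>> match_symbol_1(['Microsoft'], ['i', 'cro'])
--         ['Mi[cro]soft']
--     """
--     result = []
--     symbols = sorted(symbols, key=lambda item: len(item), reverse=True)
--     for word in words: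
--         word_replaced = ""
--         for symbol in symbols:
--             if word.find(symbol) != -1:
--                 word_replaced = word.replace(symbol, "[" + symbol + "]")
--                 result.append(word_replaced)
--                 break
--         if word_replaced == "":
--             result.append(word)
--     return result
-- ===== SOURCE B (Python) =====
-- def match_symbol_1(words: list[str], symbols: list[str]) -> list[str]:
--     """Single-pass best-symbol selection per word: no sorting of the symbol
--     list; scan symbols in original order keeping the first longest match."""
--     result = []
--     for word in words:
--         best = None
--         for symbol in symbols:
--             if (best is None or len(best) < len(symbol)) and symbol in word:
--                 best = symbol
--         result.append(word if best is None else word.replace(best, "[" + best + "]"))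
--     return result
-- ===== Notes on version B (the rewrite author's own statement) =====
-- stated objective: alternative
-- what changed: Removed the length-descending sort of symbols entirely: per word a single original-order scan keeps the first longest matching symbol (a running-maximum selection), instead of sorting and taking the first hit in sorted order.
import Mathlib
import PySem

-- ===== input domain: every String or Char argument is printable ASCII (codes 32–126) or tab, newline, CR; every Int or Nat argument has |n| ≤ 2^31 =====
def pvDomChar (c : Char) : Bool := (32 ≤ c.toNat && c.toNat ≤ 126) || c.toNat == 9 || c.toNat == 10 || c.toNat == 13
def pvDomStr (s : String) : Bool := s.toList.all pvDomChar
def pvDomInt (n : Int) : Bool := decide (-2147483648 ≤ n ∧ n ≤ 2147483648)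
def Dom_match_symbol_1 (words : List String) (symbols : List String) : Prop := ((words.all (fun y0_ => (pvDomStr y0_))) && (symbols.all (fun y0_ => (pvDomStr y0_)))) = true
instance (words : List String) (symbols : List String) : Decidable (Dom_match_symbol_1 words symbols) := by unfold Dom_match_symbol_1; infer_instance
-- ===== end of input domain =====

-- B drops the length-descending sort of the symbol list: each word is matched by one
-- original-order scan keeping the first longest symbol occurring in it (alternative algorithm).

-- ===== PORT A =====
-- A's inner 'for symbol in symbols' loop with its break: returns the list of elements
-- it appends to result (empty, or the single replaced word) and the final word_replaced.
def msLoopA (word : String) : List String → (List String × String)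
  | [] => ([], "")
  | symbol :: rest =>
      if PySem.Str.find word symbol ≠ -1 then
        let word_replaced := PySem.Str.replace word symbol ("[" ++ symbol ++ "]")
        ([word_replaced], word_replaced)
      else msLoopA word rest

def match_symbol_1 (words : List String) (symbols : List String) : List String :=
  let symbols := PySem.List.sorted symbols (fun item => PySem.Str.len item) true
  words.foldl (fun result word =>
    let r := msLoopA word symbols
    let result := result ++ r.1
    if r.2 = "" then result ++ [word] else result) []

-- ===== PORT B =====
def match_symbol_1_alt (words : List String) (symbols : List String) : List String :=
  words.foldl (fun result word =>
    let best := symbols.foldl (fun best symbol =>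
      if ((match best with
           | none => true
           | some b => decide (PySem.Str.len b < PySem.Str.len symbol))
          && PySem.Str.isIn symbol word) = true
      then some symbol else best) none
    result ++ [match best with
               | none => word
               | some b => PySem.Str.replace word b ("[" ++ b ++ "]")]) []

-- ===== PRECONDITION & SPEC =====
def Spec_match_symbol_1 (words : List String) (symbols : List String) (out : List String) : Prop := out = match_symbol_1_alt words symbols
instance (words : List String) (symbols : List String) (out : List String) : Decidable (Spec_match_symbol_1 words symbols out) := by unfold Spec_match_symbol_1; infer_instance

-- ===== CLAIM (what is proved, stated in full; the proofs are below) =====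
def Claim_equal_match_symbol_1 : Prop := ∀ (words : List String) (symbols : List String), Dom_match_symbol_1 words symbols → Spec_match_symbol_1 words symbols (match_symbol_1 words symbols)

-- ===== LEMMAS AND PROOFS =====

-- first symbol of the list occurring in `word` (proof-side characterisation)
def firstP (word : String) : List String → Option String
  | [] => none
  | s :: t => if PySem.Str.isIn s word then some s else firstP word t

-- B's inner fold step, named for the proofs (definitionally the lambda in match_symbol_1_alt)
def stepB (word : String) (best : Option String) (symbol : String) : Option String :=
  if ((match best with
       | none => true
       | some b => decide (PySem.Str.len b < PySem.Str.len symbol))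
      && PySem.Str.isIn symbol word) = true
  then some symbol else best

theorem firstP_mem_isIn {word b : String} : ∀ {l : List String}, firstP word l = some b → b ∈ l ∧ PySem.Str.isIn b word = true := by
  intro l
  induction l with
  | nil => intro h; simp [firstP] at h
  | cons s t ih =>
    intro h
    by_cases hs : PySem.Str.isIn s word = true
    · rw [firstP, if_pos hs] at h
      cases h
      exact ⟨List.mem_cons_self, hs⟩
    · rw [firstP, if_neg hs] at h
      obtain ⟨hm, hin⟩ := ih h
      exact ⟨List.mem_cons_of_mem _ hm, hin⟩

theorem firstP_insertBy (word x : String) (acc : List String)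
    (h : acc.Pairwise (fun a b => PySem.Str.len b ≤ PySem.Str.len a)) :
    firstP word (PySem.List.insertBy (fun a b => decide (PySem.Str.len b < PySem.Str.len a)) x acc)
      = stepB word (firstP word acc) x := by
  induction acc with
  | nil => simp [PySem.List.insertBy, firstP, stepB]
  | cons y ys ih =>
    rw [List.pairwise_cons] at h
    obtain ⟨hy, hys⟩ := h
    by_cases hlt : PySem.Str.len y < PySem.Str.len x
    · rw [PySem.List.insertBy, if_pos (by simpa using hlt)]
      by_cases hx : PySem.Str.isIn x word = true
      · rw [firstP, if_pos hx]
        cases hb : firstP word (y :: ys) with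
        | none =>
          simp only [stepB]
          rw [hx]
          simp
        | some b =>
          have hble : PySem.Str.len b ≤ PySem.Str.len y := by
            obtain ⟨hm, _⟩ := firstP_mem_isIn hb
            rcases List.mem_cons.mp hm with rfl | hm'
            · exact le_refl _
            · exact hy b hm'
          have hd : decide (PySem.Str.len b < PySem.Str.len x) = true :=
            decide_eq_true (lt_of_le_of_lt hble hlt)
          simp only [stepB]
          simp only [hd, hx]
          simp
      · rw [firstP, if_neg hx]
        have hx' : PySem.Str.isIn x word = false := by simpa using hx
        simp only [stepB]
        rw [hx']
        simp
    · rw [PySem.List.insertBy, if_neg (by simpa using hlt)]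
      by_cases hyw : PySem.Str.isIn y word = true
      · rw [firstP, if_pos hyw, firstP, if_pos hyw]
        have hd : decide (PySem.Str.len y < PySem.Str.len x) = false := decide_eq_false hlt
        simp only [stepB]
        simp only [hd]
        simp
      · rw [firstP, if_neg hyw, firstP, if_neg hyw]
        exact ih hys

theorem firstP_foldl_insertBy (word : String) :
    ∀ (xs l : List String),
      firstP word (xs.foldl (fun acc x => PySem.List.insertBy (fun a b => decide (PySem.Str.len b < PySem.Str.len a)) x acc)
        (PySem.List.sorted l (fun item => PySem.Str.len item) true))
      = xs.foldl (stepB word) (firstP word (PySem.List.sorted l (fun item => PySem.Str.len item) true)) := by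
  intro xs
  induction xs with
  | nil => intro l; rfl
  | cons x xs ih =>
    intro l
    have hins : PySem.List.insertBy (fun a b => decide (PySem.Str.len b < PySem.Str.len a)) x
        (PySem.List.sorted l (fun item => PySem.Str.len item) true)
        = PySem.List.sorted (l ++ [x]) (fun item => PySem.Str.len item) true := by
      rw [PySem.List.sorted_rev_eq_foldl_insertBy, PySem.List.sorted_rev_eq_foldl_insertBy,
        List.foldl_append]
      rfl
    simp only [List.foldl_cons]
    rw [hins, ih (l ++ [x]), ← hins,
      firstP_insertBy word x _ (PySem.List.sorted_pairwise_rev l (fun item => PySem.Str.len item))]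

theorem firstP_sorted (word : String) (symbols : List String) :
    firstP word (PySem.List.sorted symbols (fun item => PySem.Str.len item) true)
      = symbols.foldl (stepB word) none := by
  have h0 : PySem.List.sorted ([] : List String) (fun item => PySem.Str.len item) true = [] :=
    (PySem.List.sorted_eq_nil_iff _ _ _).mpr rfl
  have h := firstP_foldl_insertBy word symbols []
  rw [h0] at h
  rw [PySem.List.sorted_rev_eq_foldl_insertBy]
  exact h

theorem go_ne_nil (old new : List Char) :
    ∀ (fuel : Nat) (l acc : List Char), acc ≠ [] → PySem.Chars.replace.go old new fuel l acc ≠ [] := by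
  intro fuel
  induction fuel with
  | zero => intro l acc h; simp [PySem.Chars.replace.go, h]
  | succ n ih =>
    intro l acc h
    cases l with
    | nil => simp [PySem.Chars.replace.go, h]
    | cons c t =>
      rw [PySem.Chars.replace.go]
      by_cases hp : old.isPrefixOf (c :: t) = true
      · rw [if_pos hp]
        exact ih _ _ (List.append_ne_nil_of_right_ne_nil _ h)
      · rw [if_neg hp]
        exact ih _ _ (List.cons_ne_nil _ _)

theorem replace_ne_empty (word sym : String) (h : PySem.Str.isIn sym word = true) :
    PySem.Str.replace word sym ("[" ++ sym ++ "]") ≠ "" := by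
  have hinf : sym.toList <:+: word.toList := (PySem.Str.isIn_iff_infix _ _).mp h
  intro he
  have hl : (PySem.Str.replace word sym ("[" ++ sym ++ "]")).toList = [] := by rw [he]; rfl
  rw [PySem.Str.toList_replace] at hl
  have hnew : ("[" ++ sym ++ "]").toList = '[' :: (sym.toList ++ [']']) := by
    simp [String.toList_append]
  rw [hnew] at hl
  cases hs : sym.toList with
  | nil =>
    rw [hs] at hl
    simp [PySem.Chars.replace] at hl
  | cons a b =>
    rw [hs] at hl hinf
    have hw : word.toList ≠ [] := by
      intro hw0
      rw [hw0] at hinf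
      exact List.cons_ne_nil a b (List.eq_nil_of_infix_nil hinf)
    cases hword : word.toList with
    | nil => exact hw hword
    | cons c t =>
      rw [hword] at hl
      rw [PySem.Chars.replace] at hl
      simp only [List.isEmpty_cons, Bool.false_eq_true, if_false, List.length_cons] at hl
      rw [PySem.Chars.replace.go] at hl
      by_cases hp : (a :: b).isPrefixOf (c :: t) = true
      · rw [if_pos hp] at hl
        exact go_ne_nil _ _ _ _ _ (by simp) hl
      · rw [if_neg hp] at hl
        exact go_ne_nil _ _ _ _ _ (List.cons_ne_nil _ _) hl

theorem msLoopA_eq (word : String) (l : List String) :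
    msLoopA word l = match firstP word l with
      | none => ([], "")
      | some s => let wr := PySem.Str.replace word s ("[" ++ s ++ "]"); ([wr], wr) := by
  induction l with
  | nil => rfl
  | cons s t ih =>
    by_cases hin : s.toList <:+: word.toList
    · rw [msLoopA, if_pos ((PySem.Str.find_ne_neg_one_iff word s).mpr hin),
        firstP, if_pos ((PySem.Str.isIn_iff_infix s word).mpr hin)]
    · rw [msLoopA, if_neg (fun hc => hin ((PySem.Str.find_ne_neg_one_iff word s).mp hc)),
        firstP, if_neg (fun hc => hin ((PySem.Str.isIn_iff_infix s word).mp hc)), ih]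

theorem perword (symbols : List String) (word : String) (result : List String) :
    (let r := msLoopA word (PySem.List.sorted symbols (fun item => PySem.Str.len item) true);
     let result' := result ++ r.1;
     if r.2 = "" then result' ++ [word] else result')
    = result ++ [match symbols.foldl (stepB word) none with
                 | none => word
                 | some b => PySem.Str.replace word b ("[" ++ b ++ "]")] := by
  rw [← firstP_sorted, msLoopA_eq]
  cases h : firstP word (PySem.List.sorted symbols (fun item => PySem.Str.len item) true) with
  | none => simp
  | some b =>
    have hb := (firstP_mem_isIn h).2
    simp [replace_ne_empty word b hb]

-- ===== VERDICT (by name: the statement is the Claim_ definition above) =====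
theorem match_symbol_1_spec : Claim_equal_match_symbol_1 := by
  intro words symbols _
  show match_symbol_1 words symbols = match_symbol_1_alt words symbols
  have hfun : (fun (result : List String) (word : String) =>
      let r := msLoopA word (PySem.List.sorted symbols (fun item => PySem.Str.len item) true)
      let result := result ++ r.1
      if r.2 = "" then result ++ [word] else result)
    = (fun (result : List String) (word : String) =>
      let best := symbols.foldl (fun best symbol =>
        if ((match best with
             | none => true
             | some b => decide (PySem.Str.len b < PySem.Str.len symbol))
            && PySem.Str.isIn symbol word) = true
        then some symbol else best) none
      result ++ [match best with
                 | none => word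
                 | some b => PySem.Str.replace word b ("[" ++ b ++ "]")]) := by
    funext result word
    exact perword symbols word result
  exact congrArg (fun f => List.foldl f ([] : List String) words) hfun
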